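-- pv_equiv track=rewrite | github.com/caojingmiao55-debug/creator-data-tracker-template | collect_all.py | calculate_account_totals
-- ===== SOURCE A (Python) =====
-- def calculate_account_totals(account, works):
--     """从作品列表计算账号的汇总数据"""
--     account["total_views"] = sum(w["views"] for w in works)
--     account["total_likes"] = sum(w["likes"] for w in works)
--     account["total_comments"] = sum(w["comments"] for w in works)
--     account["total_shares"] = sum(w["shares"] for w in works)
--     account["total_collects"] = sum(w["collects"] for w in works)
--     account["total_works"] = len(works)
--     return account
-- ===== SOURCE B (Python) =====
-- def calculate_account_totals(account, works):
--     """Single pass over works with local accumulators instead of five separate sums."""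
--     views = likes = comments = shares = collects = 0
--     count = 0
--     for w in works:
--         views += w["views"]
--         likes += w["likes"]
--         comments += w["comments"]
--         shares += w["shares"]
--         collects += w["collects"]
--         count += 1
--     account["total_views"] = views
--     account["total_likes"] = likes
--     account["total_comments"] = comments
--     account["total_shares"] = shares
--     account["total_collects"] = collects
--     account["total_works"] = count
--     return account
-- ===== Notes on version B (the rewrite author's own statement) =====
-- stated objective: alternative
-- what changed: Replaces five separate generator-expression sums (five traversals of works) by a single for-loop maintaining six accumulators in one pass.
import Mathlib
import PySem

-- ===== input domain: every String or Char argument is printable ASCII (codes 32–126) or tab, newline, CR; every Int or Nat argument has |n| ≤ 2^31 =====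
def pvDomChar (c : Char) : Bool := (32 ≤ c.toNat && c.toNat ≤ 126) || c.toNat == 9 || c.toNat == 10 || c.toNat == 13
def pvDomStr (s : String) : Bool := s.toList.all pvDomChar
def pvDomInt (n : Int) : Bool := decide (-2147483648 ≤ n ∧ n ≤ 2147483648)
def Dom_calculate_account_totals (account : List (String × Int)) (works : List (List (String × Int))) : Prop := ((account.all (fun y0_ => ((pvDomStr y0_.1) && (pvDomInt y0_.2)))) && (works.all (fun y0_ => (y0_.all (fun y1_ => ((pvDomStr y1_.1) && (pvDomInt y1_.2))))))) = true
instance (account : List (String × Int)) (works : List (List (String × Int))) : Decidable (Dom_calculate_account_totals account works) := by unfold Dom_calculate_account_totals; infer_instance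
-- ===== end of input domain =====

-- B collapses A's five separate sums over `works` into one loop with six accumulators
-- (alternative decomposition, same cost class); A mutates `account` in place and returns
-- it — the equivalence proved here is about the RETURN value.

-- ===== PORT A =====
-- A: five independent full passes over works (one sum per metric), each written to account, then the count.
def calculate_account_totals (account : List (String × Int)) (works : List (List (String × Int))) : List (String × Int) :=
  let d := PySem.Dict.mk account
  let d := d.insert "total_views" ((works.map (fun w => (PySem.Dict.mk w).getD "views" 0)).sum)
  let d := d.insert "total_likes" ((works.map (fun w => (PySem.Dict.mk w).getD "likes" 0)).sum)
  let d := d.insert "total_comments" ((works.map (fun w => (PySem.Dict.mk w).getD "comments" 0)).sum)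
  let d := d.insert "total_shares" ((works.map (fun w => (PySem.Dict.mk w).getD "shares" 0)).sum)
  let d := d.insert "total_collects" ((works.map (fun w => (PySem.Dict.mk w).getD "collects" 0)).sum)
  let d := d.insert "total_works" (works.length : Int)
  d.items

-- ===== PORT B =====
-- B's loop body: add each metric of one work to the six accumulators.
def pvStep (t : Int × Int × Int × Int × Int × Int) (w : List (String × Int)) : Int × Int × Int × Int × Int × Int :=
  let d := PySem.Dict.mk w
  (t.1 + d.getD "views" 0, t.2.1 + d.getD "likes" 0, t.2.2.1 + d.getD "comments" 0,
   t.2.2.2.1 + d.getD "shares" 0, t.2.2.2.2.1 + d.getD "collects" 0, t.2.2.2.2.2 + 1)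

def calculate_account_totals_alt (account : List (String × Int)) (works : List (List (String × Int))) : List (String × Int) :=
  let t := works.foldl pvStep (0, 0, 0, 0, 0, 0)
  let d := PySem.Dict.mk account
  let d := d.insert "total_views" t.1
  let d := d.insert "total_likes" t.2.1
  let d := d.insert "total_comments" t.2.2.1
  let d := d.insert "total_shares" t.2.2.2.1
  let d := d.insert "total_collects" t.2.2.2.2.1
  let d := d.insert "total_works" t.2.2.2.2.2
  d.items

-- ===== PRECONDITION & SPEC =====
-- Pre_ excludes exactly the inputs on which Python A raises KeyError: a work missing one of the five metric keys.
def Pre_calculate_account_totals (account : List (String × Int)) (works : List (List (String × Int))) : Prop :=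
  works.all (fun w => (["views", "likes", "comments", "shares", "collects"].all
    (fun k => w.any (fun p => p.1 == k)))) = true
instance (account : List (String × Int)) (works : List (List (String × Int))) : Decidable (Pre_calculate_account_totals account works) := by unfold Pre_calculate_account_totals; infer_instance

def pvWitness_calculate_account_totals : (List (String × Int)) × (List (List (String × Int))) :=
  ([("name", 7)], [[("views", 1), ("likes", 2), ("comments", 3), ("shares", 4), ("collects", 5)]])

def Spec_calculate_account_totals (account : List (String × Int)) (works : List (List (String × Int))) (out : List (String × Int)) : Prop := out = calculate_account_totals_alt account works
instance (account : List (String × Int)) (works : List (List (String × Int))) (out : List (String × Int)) : Decidable (Spec_calculate_account_totals account works out) := by unfold Spec_calculate_account_totals; infer_instance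

-- ===== CLAIM (what is proved, stated in full; the proofs are below) =====
def Claim_equal_calculate_account_totals : Prop := ∀ (account : List (String × Int)) (works : List (List (String × Int))), Dom_calculate_account_totals account works → Pre_calculate_account_totals account works → Spec_calculate_account_totals account works (calculate_account_totals account works)

-- ===== LEMMAS AND PROOFS =====

-- B's single fold computes, component-wise, exactly A's five sums and the length.
lemma pvFold_eq (works : List (List (String × Int))) (t : Int × Int × Int × Int × Int × Int) :
    works.foldl pvStep t =
      (t.1 + (works.map (fun w => (PySem.Dict.mk w).getD "views" 0)).sum,
       t.2.1 + (works.map (fun w => (PySem.Dict.mk w).getD "likes" 0)).sum,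
       t.2.2.1 + (works.map (fun w => (PySem.Dict.mk w).getD "comments" 0)).sum,
       t.2.2.2.1 + (works.map (fun w => (PySem.Dict.mk w).getD "shares" 0)).sum,
       t.2.2.2.2.1 + (works.map (fun w => (PySem.Dict.mk w).getD "collects" 0)).sum,
       t.2.2.2.2.2 + (works.length : Int)) := by
  induction works generalizing t with
  | nil => simp
  | cons w ws ih =>
      simp only [List.foldl_cons, List.map_cons, List.sum_cons, List.length_cons, ih, pvStep]
      refine Prod.ext ?_ (Prod.ext ?_ (Prod.ext ?_ (Prod.ext ?_ (Prod.ext ?_ ?_)))) <;> simp <;> ring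

-- ===== VERDICT (by name: the statement is the Claim_ definition above) =====
theorem calculate_account_totals_spec : Claim_equal_calculate_account_totals := by
  intro account works _ _
  unfold Spec_calculate_account_totals calculate_account_totals calculate_account_totals_alt
  rw [pvFold_eq]
  simp
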